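-- pv_equiv track=rewrite | github.com/erickwize/clinics | main.py | get_n_students
-- ===== SOURCE A (Python) =====
-- from itertools import cycle
--
-- def get_n_students(group: list, exclude, number):
--     pool = cycle(group)
--     students = []
--     for i in range(exclude):
--         next(pool)
--     for i in range(number):
--         students.append(next(pool))
--     return students
-- ===== SOURCE B (Python) =====
-- def get_n_students(group, exclude, number):
--     n = len(group)
--     start = max(exclude, 0)
--     return [group[(start + i) % n] for i in range(number)]
-- ===== Notes on version B (the rewrite author's own statement) =====
-- stated objective: alternative
-- what changed: replaces the iterator simulation (stepping a cycle() iterator exclude times and then number more times) by direct modular indexing group[(max(exclude,0)+i) % len(group)] for i in range(number)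
import Mathlib
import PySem

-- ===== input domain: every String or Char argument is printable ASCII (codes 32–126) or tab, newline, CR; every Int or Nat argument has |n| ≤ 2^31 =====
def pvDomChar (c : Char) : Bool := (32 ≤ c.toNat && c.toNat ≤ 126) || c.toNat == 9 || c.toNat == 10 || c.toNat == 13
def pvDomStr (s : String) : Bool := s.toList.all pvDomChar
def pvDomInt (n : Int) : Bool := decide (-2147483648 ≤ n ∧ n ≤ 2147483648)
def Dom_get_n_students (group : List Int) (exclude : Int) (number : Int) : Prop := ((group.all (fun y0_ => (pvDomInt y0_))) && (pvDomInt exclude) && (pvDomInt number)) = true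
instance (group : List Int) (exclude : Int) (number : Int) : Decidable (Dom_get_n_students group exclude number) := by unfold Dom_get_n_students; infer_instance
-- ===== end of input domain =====

-- B replaces A's step-by-step cycle-iterator simulation by direct modular indexing (alternative algorithm, same values).

-- ===== PORT A =====
-- A steps an infinite cycle(group) iterator.  The iterator state is the current
-- position `pos` (a Nat < group.length for nonempty group); next(pool) yields
-- group[pos] and advances to (pos+1) % len.  Exact for nonempty group; for an
-- empty group next(pool) raises StopIteration, which Pre_ excludes.
def get_n_students (group : List Int) (exclude : Int) (number : Int) : List Int :=
  let len := group.length
  let pos := (PySem.List.pyRange 0 exclude 1).foldl (fun p _ => (p + 1) % len) 0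
  ((PySem.List.pyRange 0 number 1).foldl
      (fun (s : List Int × Nat) _ => (s.1 ++ [group.getD s.2 0], (s.2 + 1) % len))
      ([], pos)).1

-- ===== PORT B =====
-- Source B: index (start+i) % n is nonnegative and < n whenever n > 0, so the
-- IndexError-free list indexing is ported as pyGet? with getD 0 (never hit on Pre_).
def get_n_students_alt (group : List Int) (exclude : Int) (number : Int) : List Int :=
  let n : Int := group.length
  let start := max exclude 0
  (PySem.List.pyRange 0 number 1).map
    (fun i => (PySem.List.pyGet? group (PySem.Int.mod (start + i) n)).getD 0)

-- ===== PRECONDITION & SPEC =====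
-- Pre_ excludes exactly the inputs where Python A raises: an empty group with
-- exclude > 0 or number > 0 (next() on cycle([]) raises StopIteration).
def Pre_get_n_students (group : List Int) (exclude : Int) (number : Int) : Prop :=
  group ≠ [] ∨ (exclude ≤ 0 ∧ number ≤ 0)
instance (group : List Int) (exclude : Int) (number : Int) : Decidable (Pre_get_n_students group exclude number) := by unfold Pre_get_n_students; infer_instance

def pvWitness_get_n_students : List Int × Int × Int := ([3, 1, 4, 1, 5], 7, 4)

def Spec_get_n_students (group : List Int) (exclude : Int) (number : Int) (out : List Int) : Prop := out = get_n_students_alt group exclude number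
instance (group : List Int) (exclude : Int) (number : Int) (out : List Int) : Decidable (Spec_get_n_students group exclude number out) := by unfold Spec_get_n_students; infer_instance

-- ===== CLAIM (what is proved, stated in full; the proofs are below) =====
def Claim_equal_get_n_students : Prop := ∀ (group : List Int) (exclude : Int) (number : Int), Dom_get_n_students group exclude number → Pre_get_n_students group exclude number → Spec_get_n_students group exclude number (get_n_students group exclude number)

-- ===== LEMMAS AND PROOFS =====

-- the skip loop: stepping k times from p (p < len) lands at (p + k) % len
lemma skip_foldl {β : Type} (len : Nat) (hlen : 0 < len) :
    ∀ (l : List β) (p : Nat), p < len →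
      l.foldl (fun q _ => (q + 1) % len) p = (p + l.length) % len := by
  intro l
  induction l with
  | nil => intro p hp; simp [Nat.mod_eq_of_lt hp]
  | cons a l ih =>
      intro p hp
      have h1 : (p + 1) % len < len := Nat.mod_lt _ hlen
      simp only [List.foldl_cons, ih _ h1, List.length_cons]
      rw [Nat.mod_add_mod]
      congr 1
      omega

-- the collect loop: invariant characterisation as a map over range
lemma collect_foldl {β : Type} (group : List Int) (len : Nat) (hpos : 0 < len) :
    ∀ (l : List β) (acc : List Int) (p : Nat), p < len →
      (l.foldl (fun (s : List Int × Nat) _ => (s.1 ++ [group.getD s.2 0], (s.2 + 1) % len))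
          (acc, p)).1
        = acc ++ (List.range l.length).map (fun i => group.getD ((p + i) % len) 0) := by
  intro l
  induction l with
  | nil => intro acc p hp; simp
  | cons a l ih =>
      intro acc p hp
      have h1 : (p + 1) % len < len := Nat.mod_lt _ hpos
      simp only [List.foldl_cons, ih _ _ h1, List.length_cons, List.range_succ_eq_map,
        List.map_cons, List.map_map]
      rw [List.append_assoc]
      congr 1
      simp only [List.cons_append, List.nil_append]
      congr 1
      · simp [Nat.mod_eq_of_lt hp]
      · congr 1
        funext i
        simp only [Function.comp_apply]
        have h2 : ((p + 1) % len + i) % len = (p + (i + 1)) % len := by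
          rw [Nat.mod_add_mod]; congr 1; omega
        simp [h2]

-- ===== VERDICT (by name: the statement is the Claim_ definition above) =====
theorem get_n_students_spec : Claim_equal_get_n_students := by
  intro g e n _ hpre
  unfold Spec_get_n_students get_n_students get_n_students_alt
  by_cases hg : g = []
  · rcases hpre with h | ⟨he, hn⟩
    · exact absurd hg h
    · simp [hg, PySem.List.pyRange_one_eq_nil (show n ≤ 0 by omega)]
  · have hpos : 0 < g.length := List.length_pos_of_ne_nil hg
    have hskip := skip_foldl g.length hpos (PySem.List.pyRange 0 e 1) 0 hpos
    simp only [hskip, PySem.List.length_pyRange_one, Int.sub_zero, Nat.zero_add]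
    have hmodlt : e.toNat % g.length < g.length := Nat.mod_lt _ hpos
    rw [collect_foldl g g.length hpos (PySem.List.pyRange 0 n 1) [] _ hmodlt]
    rw [PySem.List.pyRange_one 0 n, List.map_map]
    simp only [List.length_map, List.length_range, Int.sub_zero, List.nil_append]
    apply List.map_congr_left
    intro k _
    have hmax : max e 0 = ((e.toNat : Nat) : Int) := by omega
    have hmod : PySem.Int.mod (max e 0 + (0 + (k : Int))) (g.length : Int)
        = (((e.toNat + k) % g.length : Nat) : Int) := by
      rw [PySem.Int.mod_eq_emod_of_pos (by exact_mod_cast hpos), hmax]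
      push_cast
      norm_num
    rw [Function.comp_apply, hmod, PySem.List.pyGet?_natCast]
    rw [Nat.mod_add_mod]
    exact List.getD_eq_getElem?_getD.symm
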